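-- pv_equiv track=rewrite | github.com/realAYAYA/UnrealEngine-ToonLit | UnrealEngine/Engine/Plugins/VirtualProduction/Switchboard/Source/Switchboard/switchboard/devices/unreal/plugin_unreal.py | add_or_override_cvars
-- ===== SOURCE A (Python) =====
-- from collections import OrderedDict
--
-- def add_or_override_cvars(cvars:list[str], new_cvars:list[str]):
--     ''' Adds new cvars, or overrides values if already existing.
--
--     Args:
--         cvars     : Cvars to be overridden
--         new_cvars : Cvars to override or add
--
--     Returns:
--         list[str]: Resulting list of cvars.
--     '''
--
--     cvars_map = OrderedDict() # keep the original order
--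
--     for cvar in cvars + new_cvars:
--
--         parts = cvar.strip().split('=')
--
--         if len(parts) != 2:
--             continue
--
--         name = parts[0]
--         value = parts[1]
--
--         cvars_map[name.lower()] = (name,value)
--
--     return [f'{cvar[0]}={cvar[1]}' for cvar in cvars_map.values()]
-- ===== SOURCE B (Python) =====
-- def add_or_override_cvars(cvars: list[str], new_cvars: list[str]):
--     '''Adds new cvars, or overrides values if already existing.
--
--     No dictionary at all: parse once into (key, name, value) triples, then
--     for each triple that is the first occurrence of its key (checked against
--     the prefix of keys already walked), find the winning name/value by
--     scanning the triples from the back.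
--     '''
--     entries = []
--     for cvar in cvars + new_cvars:
--         parts = cvar.strip().split('=')
--         if len(parts) == 2:
--             entries.append((parts[0].lower(), parts[0], parts[1]))
--     out = []
--     prefix = []
--     for key, _, _ in entries:
--         if key not in prefix:
--             for k, name, value in reversed(entries):
--                 if k == key:
--                     out.append(f'{name}={value}')
--                     break
--         prefix.append(key)
--     return out
-- ===== Notes on version B (the rewrite author's own statement) =====
-- stated objective: alternative
-- what changed: Drops the OrderedDict entirely: B parses into triples once, then emits each key at its first occurrence (prefix membership scan) with its final value found by a backwards scan of the triples - quadratic scans instead of a hash map.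
import Mathlib
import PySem

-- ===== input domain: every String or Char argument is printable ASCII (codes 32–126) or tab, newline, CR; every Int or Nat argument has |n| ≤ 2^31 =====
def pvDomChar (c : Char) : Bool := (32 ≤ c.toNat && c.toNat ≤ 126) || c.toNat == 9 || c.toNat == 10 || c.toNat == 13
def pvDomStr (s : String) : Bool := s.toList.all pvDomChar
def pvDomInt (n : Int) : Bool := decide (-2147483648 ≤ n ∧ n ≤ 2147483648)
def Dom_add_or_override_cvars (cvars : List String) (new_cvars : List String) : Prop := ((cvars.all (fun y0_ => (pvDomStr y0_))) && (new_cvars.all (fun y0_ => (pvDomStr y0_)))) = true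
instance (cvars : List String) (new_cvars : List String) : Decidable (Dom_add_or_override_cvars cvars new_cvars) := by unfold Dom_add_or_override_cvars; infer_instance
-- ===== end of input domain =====

-- B drops the OrderedDict: it emits each key at its first occurrence with the value found by a backwards scan over the parsed triples (alternative quadratic algorithm, no map).

-- ===== PORT A =====
-- parts = cvar.strip().split('='); if len(parts) != 2: continue  (parsing step both Pythons perform)
def pvParse? (cvar : String) : Option (String × String) :=
  match PySem.Str.split? (PySem.Str.strip cvar) "=" with
  | some [name, value] => some (name, value)
  | _ => none

def add_or_override_cvars (cvars : List String) (new_cvars : List String) : List String :=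
  let m := (cvars ++ new_cvars).foldl
    (fun (d : PySem.Dict String (String × String)) cvar =>
      match pvParse? cvar with
      | none => d
      | some (name, value) => d.insert (PySem.Str.lower name) (name, value))
    PySem.Dict.empty
  m.values.map (fun p => p.1 ++ "=" ++ p.2)

-- ===== PORT B =====
def add_or_override_cvars_alt (cvars : List String) (new_cvars : List String) : List String :=
  -- entries: (key, (name, value)) triples, in order
  let entries := (cvars ++ new_cvars).foldl
    (fun (acc : List (String × String × String)) cvar =>
      match pvParse? cvar with
      | none => acc
      | some (name, value) => acc ++ [(PySem.Str.lower name, name, value)]) []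
  -- emit at first occurrence (prefix is the list of keys already walked);
  -- winning name/value by scanning the reversed triples (the break = find?;
  -- the none branch is unreachable since the current triple itself matches)
  (entries.foldl
    (fun (st : List String × List String) e =>
      if st.2.contains e.1 then (st.1, st.2 ++ [e.1])
      else
        match entries.reverse.find? (fun q => q.1 == e.1) with
        | some q => (st.1 ++ [q.2.1 ++ "=" ++ q.2.2], st.2 ++ [e.1])
        | none => (st.1, st.2 ++ [e.1]))
    ([], [])).1

-- ===== PRECONDITION & SPEC =====
def Spec_add_or_override_cvars (cvars : List String) (new_cvars : List String) (out : List String) : Prop := out = add_or_override_cvars_alt cvars new_cvars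
instance (cvars : List String) (new_cvars : List String) (out : List String) : Decidable (Spec_add_or_override_cvars cvars new_cvars out) := by unfold Spec_add_or_override_cvars; infer_instance

-- ===== CLAIM =====
def Claim_equal_add_or_override_cvars : Prop := ∀ (cvars : List String) (new_cvars : List String), Dom_add_or_override_cvars cvars new_cvars → Spec_add_or_override_cvars cvars new_cvars (add_or_override_cvars cvars new_cvars)

-- ===== LEMMAS AND PROOFS =====

-- keyed, parsed view of the combined list
def pvKeyed (combined : List String) : List (String × String × String) :=
  combined.filterMap (fun c => (pvParse? c).map (fun p => (PySem.Str.lower p.1, p)))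

-- A's fold is the insert-fold over the keyed list
theorem pvA_fold : ∀ (combined : List String) (d : PySem.Dict String (String × String)),
    combined.foldl
      (fun (d : PySem.Dict String (String × String)) cvar =>
        match pvParse? cvar with
        | none => d
        | some (name, value) => d.insert (PySem.Str.lower name) (name, value))
      d = (pvKeyed combined).foldl (fun d p => d.insert p.1 p.2) d := by
  intro combined
  induction combined with
  | nil => intro d; simp [pvKeyed]
  | cons c t ih =>
    intro d
    simp only [pvKeyed, List.filterMap_cons, List.foldl_cons]
    cases h : pvParse? c with
    | none => simp [ih, pvKeyed]
    | some p => cases p with | mk n v => simp [ih, pvKeyed, List.foldl_cons]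

-- B's first pass builds exactly the keyed list
theorem pvB_entries : ∀ (combined : List String) (acc : List (String × String × String)),
    combined.foldl
      (fun (acc : List (String × String × String)) cvar =>
        match pvParse? cvar with
        | none => acc
        | some (name, value) => acc ++ [(PySem.Str.lower name, name, value)]) acc
    = acc ++ pvKeyed combined := by
  intro combined
  induction combined with
  | nil => intro acc; simp [pvKeyed]
  | cons c t ih =>
    intro acc
    simp only [pvKeyed, List.filterMap_cons, List.foldl_cons]
    cases h : pvParse? c with
    | none => simp [ih, pvKeyed]
    | some p => cases p with | mk n v => simp [ih, pvKeyed]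

-- getD of an insert-fold is the LAST binding: first match in the reversed list
theorem pvGetD_foldl_insert (dflt : String × String) :
    ∀ (l : List (String × String × String)) (d : PySem.Dict String (String × String)) (k : String),
    ((l.foldl (fun d p => d.insert p.1 p.2) d).getD k dflt)
    = match l.reverse.find? (fun q => q.1 == k) with
      | some q => q.2
      | none => d.getD k dflt := by
  intro l
  induction l with
  | nil => intro d k; simp
  | cons p t ih =>
    intro d k
    rw [List.foldl_cons, ih]
    have : (p :: t).reverse = t.reverse ++ [p] := by simp
    rw [this, List.find?_append]
    cases h : t.reverse.find? (fun q => q.1 == k) with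
    | some q => simp
    | none =>
      by_cases hk : p.1 = k
      · simp [hk]
      · simp [hk, PySem.Dict.getD_insert, Ne.symm hk]

-- the entries emitted by B's second loop: first occurrences w.r.t. a seen prefix
def pvFreshE (es : List (String × String × String)) (s : List String) : List (String × String × String) :=
  match es with
  | [] => []
  | e :: t => if s.contains e.1 then pvFreshE t (s ++ [e.1]) else e :: pvFreshE t (s ++ [e.1])

theorem pvFreshE_subset : ∀ (es : List (String × String × String)) (s : List String),
    ∀ e ∈ pvFreshE es s, e ∈ es := by
  intro es
  induction es with
  | nil => intro s e h; simp [pvFreshE] at h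
  | cons a t ih =>
    intro s e h
    simp only [pvFreshE] at h
    by_cases hc : s.contains a.1
    · rw [if_pos hc] at h
      exact List.mem_cons_of_mem _ (ih _ e h)
    · rw [if_neg hc] at h
      rcases List.mem_cons.mp h with h | h
      · simp [h]
      · exact List.mem_cons_of_mem _ (ih _ e h)

-- B's second loop, with the per-entry emission abstracted as g
theorem pvEmitB (entries : List (String × String × String))
    (g : (String × String × String) → List String)
    (hg : ∀ e, g e = match entries.reverse.find? (fun q => q.1 == e.1) with
        | some q => [q.2.1 ++ "=" ++ q.2.2]
        | none => []) :
    ∀ (es : List (String × String × String)) (acc : List String) (s : List String),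
    (es.foldl
      (fun (st : List String × List String) e =>
        if st.2.contains e.1 then (st.1, st.2 ++ [e.1])
        else
          match entries.reverse.find? (fun q => q.1 == e.1) with
          | some q => (st.1 ++ [q.2.1 ++ "=" ++ q.2.2], st.2 ++ [e.1])
          | none => (st.1, st.2 ++ [e.1]))
      (acc, s)).1
    = acc ++ ((pvFreshE es s).map g).flatten := by
  intro es
  induction es with
  | nil => intro acc s; simp [pvFreshE]
  | cons e t ih =>
    intro acc s
    rw [List.foldl_cons]
    by_cases h : s.contains e.1
    · simp only [h, if_true]
      rw [ih, pvFreshE, if_pos h]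
    · simp only [h]
      rw [pvFreshE, if_neg h]
      cases hf : entries.reverse.find? (fun q => q.1 == e.1) with
      | some q =>
        rw [ih]
        simp [hg, hf]
      | none =>
        rw [ih]
        simp [hg, hf]

-- the keys of the fresh entries are the dedup-by-first-occurrence keys
theorem pvFreshE_map_fst : ∀ (es : List (String × String × String)) (s : List String) (s' : PySem.Set String),
    (∀ x, x ∈ s ↔ x ∈ s') →
    s' ++ (pvFreshE es s).map (·.1) = (es.map (·.1)).foldl PySem.Set.add s' := by
  intro es
  induction es with
  | nil => intro s s' h; simp [pvFreshE]
  | cons e t ih =>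
    intro s s' h
    simp only [pvFreshE, List.map_cons, List.foldl_cons]
    by_cases hc : s.contains e.1
    · have hin : e.1 ∈ s' := (h e.1).mp (by simpa [List.contains_eq_mem] using hc)
      have hadd : PySem.Set.add s' e.1 = s' := by simp [PySem.Set.add, hin]
      rw [if_pos hc, hadd]
      exact ih _ s' (by
        intro x
        constructor
        · intro hx
          rcases List.mem_append.mp hx with hx | hx
          · exact (h x).mp hx
          · simp at hx; rw [hx]; exact hin
        · intro hx; exact List.mem_append.mpr (Or.inl ((h x).mpr hx)))
    · have hnin : e.1 ∉ s' := fun hx => hc (by simpa [List.contains_eq_mem] using (h e.1).mpr hx)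
      have hadd : PySem.Set.add s' e.1 = s' ++ [e.1] := by simp [PySem.Set.add, hnin]
      rw [if_neg hc, hadd]
      have := ih (s ++ [e.1]) (s' ++ [e.1]) (by intro x; simp [h x])
      simpa using this

-- flatten of a map of singletons is a map
theorem pvFlattenSingles {α β : Type} (t : List α) (g : α → List β) (f : α → β)
    (h : ∀ e ∈ t, g e = [f e]) : (t.map g).flatten = t.map f := by
  induction t with
  | nil => simp
  | cons a s ih =>
    simp only [List.map_cons, List.flatten_cons, h a (by simp)]
    rw [ih (fun e he => h e (by simp [he]))]
    rfl

-- ===== VERDICT =====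
theorem add_or_override_cvars_spec : Claim_equal_add_or_override_cvars := by
  intro cvars new_cvars _
  unfold Spec_add_or_override_cvars add_or_override_cvars add_or_override_cvars_alt
  rw [pvA_fold, pvB_entries]
  dsimp only [List.nil_append]
  set l := pvKeyed (cvars ++ new_cvars) with hl
  set d := l.foldl (fun d p => d.insert p.1 p.2) (PySem.Dict.empty : PySem.Dict String (String × String)) with hd
  have hnd : d.keys.Nodup := by
    rw [hd]
    exact PySem.Dict.nodup_keys_foldl_insert_key l (·.1) (fun _ p => p.2) _ (by simp)
  have hkeys : d.keys = (l.map (·.1)).foldl PySem.Set.add [] := by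
    rw [hd, PySem.Dict.keys_foldl_insert_key]
    simp [PySem.Set.update, PySem.Dict.keys_empty]
  have hB := pvEmitB l (fun e =>
      match l.reverse.find? (fun q => q.1 == e.1) with
      | some q => [q.2.1 ++ "=" ++ q.2.2]
      | none => []) (fun e => rfl) l [] []
  rw [hB]
  dsimp only [List.nil_append]
  -- B's flatten collapses to a map of the same rendering A uses
  have hsing : ∀ e ∈ pvFreshE l [], (fun e =>
      match l.reverse.find? (fun q => q.1 == e.1) with
      | some q => [q.2.1 ++ "=" ++ q.2.2]
      | none => []) e
      = [(d.getD e.1 ("", "")).1 ++ "=" ++ (d.getD e.1 ("", "")).2] := by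
    intro e he
    have hmem : e ∈ l.reverse := by simpa using pvFreshE_subset l [] e he
    have hsome : (l.reverse.find? (fun q => q.1 == e.1)).isSome := by
      rw [List.find?_isSome]
      exact ⟨e, hmem, by simp⟩
    rcases Option.isSome_iff_exists.mp hsome with ⟨q, hq⟩
    have hgd : d.getD e.1 ("", "") = q.2 := by
      rw [hd, pvGetD_foldl_insert, hq]
    simp [hq, hgd]
  rw [pvFlattenSingles _ _ _ hsing]
  -- A's values collapse to the same map over the same key list
  have hfst : (pvFreshE l []).map (·.1) = (l.map (·.1)).foldl PySem.Set.add [] := by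
    simpa [PySem.Set.empty] using pvFreshE_map_fst l [] [] (by intro x; simp)
  rw [PySem.Dict.values_eq_map_keys d hnd ("", ""), hkeys, ← hfst]
  simp [List.map_map, Function.comp]
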